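-- pv_equiv track=rewrite | github.com/t-tsekov/codefights-solutions | interview/commonCharacterCount2.py | commonCharacterCount2
-- ===== SOURCE A (Python) =====
-- def commonCharacterCount2(s):
--     from collections import Counter
--     common = Counter(s[0])
--     for i in range(1, len(s)):
--         cur = Counter(s[i])
--         for k in common.keys():
--             if k not in cur.keys():
--                 common[k] = 0
--             else:
--                 common[k] = min(common[k], cur[k])
--
--     return sum(common.values())
-- ===== SOURCE B (Python) =====
-- def commonCharacterCount2(s):
--     common = list(s[0])
--     for x in s[1:]:
--         pool = list(x)
--         kept = []
--         for ch in common: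
--             if ch in pool:
--                 pool.remove(ch)
--                 kept.append(ch)
--         common = kept
--     return len(common)
-- ===== Notes on version B (the rewrite author's own statement) =====
-- stated objective: alternative
-- what changed: Replaces A's Counter-dict fold (per-key running minimum of counts) with a dict-free greedy multiset intersection: keep the first string's characters as a list and, for each later string, retain each character only if it can still be removed from that string's character pool; the answer is the length of the surviving list.
import Mathlib
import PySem

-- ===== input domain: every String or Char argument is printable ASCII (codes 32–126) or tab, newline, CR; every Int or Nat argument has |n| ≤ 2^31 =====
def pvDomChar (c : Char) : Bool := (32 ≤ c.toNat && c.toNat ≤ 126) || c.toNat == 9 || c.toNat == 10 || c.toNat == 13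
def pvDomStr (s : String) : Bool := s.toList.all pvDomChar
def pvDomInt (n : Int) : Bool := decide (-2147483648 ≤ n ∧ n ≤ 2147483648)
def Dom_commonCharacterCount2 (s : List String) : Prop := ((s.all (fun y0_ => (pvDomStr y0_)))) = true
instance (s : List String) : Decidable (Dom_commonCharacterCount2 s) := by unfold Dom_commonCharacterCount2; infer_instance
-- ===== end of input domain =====

-- B drops the Counter dict entirely: it intersects character multisets greedily by
-- removing matches from a pool and returns the surviving list's length (objective: alternative).

-- ===== PORT A =====
def commonCharacterCount2 (s : List String) : Int :=
  match s with
  | [] => 0  -- Python raises IndexError on s[0]; excluded by Pre_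
  | s0 :: rest =>
    let common := PySem.Dict.counter s0.toList
    let common := rest.foldl (fun common x =>
      let cur := PySem.Dict.counter x.toList
      common.keys.foldl (fun d k =>
        if cur.contains k = false then d.insert k 0
        else d.insert k (min (d.getD k 0) (cur.getD k 0))) common) common
    common.values.sum

-- ===== PORT B =====
def commonCharacterCount2_alt (s : List String) : Int :=
  match s with
  | [] => 0  -- Python raises IndexError on s[0]; excluded by Pre_
  | s0 :: rest =>
    let common := s0.toList
    let common := rest.foldl (fun common x =>
      let pool := x.toList
      -- inner loop state: (pool, kept); 'pool.remove(ch)' is guarded by 'ch in pool',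
      -- so List.erase (remove first occurrence) is exact here
      let st := common.foldl (fun (st : List Char × List Char) ch =>
        if ch ∈ st.1 then (st.1.erase ch, st.2 ++ [ch]) else st) (pool, ([] : List Char))
      st.2) common
    (common.length : Int)

-- ===== PRECONDITION & SPEC =====
-- Pre_ excludes only the empty list, on which Python A raises IndexError (s[0]).
def Pre_commonCharacterCount2 (s : List String) : Prop := s ≠ []
instance (s : List String) : Decidable (Pre_commonCharacterCount2 s) := by unfold Pre_commonCharacterCount2; infer_instance
def pvWitness_commonCharacterCount2 : List String := ["aba", "ab"]
def Spec_commonCharacterCount2 (s : List String) (out : Int) : Prop := out = commonCharacterCount2_alt s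
instance (s : List String) (out : Int) : Decidable (Spec_commonCharacterCount2 s out) := by unfold Spec_commonCharacterCount2; infer_instance

-- ===== CLAIM (what is proved, stated in full; the proofs are below) =====
def Claim_equal_commonCharacterCount2 : Prop := ∀ (s : List String), Dom_commonCharacterCount2 s → Pre_commonCharacterCount2 s → Spec_commonCharacterCount2 s (commonCharacterCount2 s)

-- ===== LEMMAS AND PROOFS =====

-- Folding value-inserts at the distinct, already-present keys K rewrites each key's
-- value through f and leaves the key list unchanged.
lemma foldl_insert_keyed (f : Char → Int → Int) :
    ∀ (K : List Char) (d : PySem.Dict Char Int), K.Nodup →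
    (∀ k ∈ K, d.contains k = true) →
    (K.foldl (fun d k => d.insert k (f k (d.getD k 0))) d).keys = d.keys ∧
    ∀ k, (K.foldl (fun d k => d.insert k (f k (d.getD k 0))) d).getD k 0
         = if k ∈ K then f k (d.getD k 0) else d.getD k 0 := by
  intro K
  induction K with
  | nil => intro d _ _; simp
  | cons k0 K ih =>
    intro d hnd hct
    simp only [List.foldl_cons]
    set d' := d.insert k0 (f k0 (d.getD k0 0)) with hd'
    have hk0 : d.contains k0 = true := hct k0 (by simp)
    have hkeys' : d'.keys = d.keys := PySem.Dict.keys_insert_of_contains _ _ hk0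
    have hct' : ∀ k ∈ K, d'.contains k = true := by
      intro k hk
      have := hct k (by simp [hk])
      simp [hd', PySem.Dict.contains_insert, this]
    obtain ⟨hkeysIH, hgetIH⟩ := ih d' hnd.of_cons hct'
    refine ⟨by rw [hkeysIH, hkeys'], ?_⟩
    intro k
    rw [hgetIH k]
    by_cases hkK : k ∈ K
    · have hne : k ≠ k0 := fun h => (List.nodup_cons.mp hnd).1 (h ▸ hkK)
      simp [hkK, hd', PySem.Dict.getD_insert, hne]
    · by_cases hkk0 : k = k0
      · subst hkk0; simp [hkK, hd']
      · simp [hkK, hkk0, hd', PySem.Dict.getD_insert]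

-- One outer-loop step of A, in the canonical single-insert form.
lemma stepA_eq (x : String) (common : PySem.Dict Char Int) :
    (common.keys.foldl (fun d k =>
        if (PySem.Dict.counter x.toList).contains k = false then d.insert k 0
        else d.insert k (min (d.getD k 0) ((PySem.Dict.counter x.toList).getD k 0))) common)
    = common.keys.foldl (fun d k => d.insert k
        (if (PySem.Dict.counter x.toList).contains k = false then 0
         else min (d.getD k 0) ((PySem.Dict.counter x.toList).getD k 0))) common := by
  apply PySem.List.foldl_congr_mem
  intro acc k _
  split_ifs <;> rfl

-- The outer fold of A keeps the key list and computes the running minimum of counts.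
lemma outer_fold_A (rest : List String) :
    ∀ (d : PySem.Dict Char Int), d.keys.Nodup → (∀ k, 0 ≤ d.getD k 0) →
    (rest.foldl (fun common x =>
        let cur := PySem.Dict.counter x.toList
        common.keys.foldl (fun d k =>
          if cur.contains k = false then d.insert k 0
          else d.insert k (min (d.getD k 0) (cur.getD k 0))) common) d).keys = d.keys ∧
    ∀ k, (rest.foldl (fun common x =>
        let cur := PySem.Dict.counter x.toList
        common.keys.foldl (fun d k =>
          if cur.contains k = false then d.insert k 0
          else d.insert k (min (d.getD k 0) (cur.getD k 0))) common) d).getD k 0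
      = if k ∈ d.keys
        then (rest.map (fun x => ((x.toList.count k : Int)))).foldl min (d.getD k 0)
        else 0 := by
  induction rest with
  | nil =>
    intro d hnd hnn
    refine ⟨rfl, ?_⟩
    intro k
    by_cases hk : k ∈ d.keys
    · simp [hk]
    · have hc : d.contains k = false := by
        rw [PySem.Dict.contains_eq_decide_mem_keys]; simp [hk]
      simp [hk, PySem.Dict.getD_of_not_contains _ _ hc]
  | cons x rest ih =>
    intro d hnd hnn
    simp only [List.foldl_cons]
    set f : Char → Int → Int := fun k v =>
      (if (PySem.Dict.counter x.toList).contains k = false then 0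
       else min v ((PySem.Dict.counter x.toList).getD k 0)) with hf
    have hct : ∀ k ∈ d.keys, d.contains k = true := by
      intro k hk; simpa [PySem.Dict.contains_eq_decide_mem_keys] using hk
    have hstep := stepA_eq x d
    obtain ⟨hK, hG⟩ := foldl_insert_keyed f d.keys d hnd hct
    set d' := d.keys.foldl (fun d k => d.insert k (f k (d.getD k 0))) d with hd'
    have hfmin : ∀ k v, 0 ≤ v → f k v = min v ((x.toList.count k : Int)) := by
      intro k v hv
      by_cases hc : (PySem.Dict.counter x.toList).contains k = false
      · have hnotmem : k ∉ x.toList := by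
          simpa [PySem.Dict.contains_counter] using hc
        have : x.toList.count k = 0 := List.count_eq_zero.mpr hnotmem
        simp [hf, hc, this]
        omega
      · simp [hf, hc, PySem.Dict.getD_counter]
    have hnn' : ∀ k, 0 ≤ d'.getD k 0 := by
      intro k
      rw [hd', hG k]
      by_cases hk : k ∈ d.keys
      · simp only [hk, if_pos]
        rw [hfmin k _ (hnn k)]
        have := hnn k
        have : (0:Int) ≤ (x.toList.count k : Int) := Int.natCast_nonneg _
        omega
      · simpa [hk] using hnn k
    obtain ⟨hKr, hGr⟩ := ih d' (by rw [hd', hK]; exact hnd) hnn'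
    rw [hstep]
    refine ⟨hKr.trans hK, ?_⟩
    intro k
    refine (hGr k).trans ?_
    rw [hK]
    by_cases hk : k ∈ d.keys
    · simp only [hk, if_pos, List.map_cons, List.foldl_cons]
      rw [hG k]
      simp only [hk, if_pos]
      rw [hfmin k _ (hnn k)]
    · simp [hk]

-- B's inner loop: the kept list counts each character min(common, pool) times.
-- B's inner loop: the kept list counts each character min(common, pool) times.
lemma innerB_count (k : Char) :
    ∀ (common pool kept : List Char),
    ((common.foldl (fun (st : List Char × List Char) ch =>
        if ch ∈ st.1 then (st.1.erase ch, st.2 ++ [ch]) else st) (pool, kept)).2).count k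
      = kept.count k + min (common.count k) (pool.count k) := by
  intro common
  induction common with
  | nil => intro pool kept; simp
  | cons ch common ih =>
    intro pool kept
    simp only [List.foldl_cons]
    by_cases h : ch ∈ pool
    · rw [if_pos h]
      rw [ih (pool.erase ch) (kept ++ [ch])]
      have hpc : 1 ≤ pool.count ch := List.one_le_count_iff.mpr h
      by_cases hk : k = ch
      · subst hk
        simp only [List.count_append, List.count_cons, List.count_erase, List.count_nil]
        simp
        omega
      · have hk' : ch ≠ k := Ne.symm hk
        have h1 : (kept ++ [ch]).count k = kept.count k := by
          simp [List.count_append, hk']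
        have h2 : (pool.erase ch).count k = pool.count k := by
          rw [List.count_erase]; simp [hk']
        have h3 : (ch :: common).count k = common.count k := by
          simp [hk']
        rw [h1, h2, h3]
    · rw [if_neg h]
      rw [ih pool kept]
      by_cases hk : k = ch
      · subst hk
        have h0 : pool.count k = 0 := List.count_eq_zero.mpr h
        simp [h0]
      · have hk' : ch ≠ k := Ne.symm hk
        have h3 : (ch :: common).count k = common.count k := by
          simp [hk']
        rw [h3]

-- B's inner loop only keeps characters taken from common (plus the starting kept).
lemma innerB_mem :
    ∀ (common pool kept : List Char) (a : Char),
    a ∈ ((common.foldl (fun (st : List Char × List Char) ch =>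
        if ch ∈ st.1 then (st.1.erase ch, st.2 ++ [ch]) else st) (pool, kept)).2) →
    a ∈ kept ∨ a ∈ common := by
  intro common
  induction common with
  | nil => intro pool kept a ha; simp at ha; exact Or.inl ha
  | cons ch common ih =>
    intro pool kept a ha
    simp only [List.foldl_cons] at ha
    by_cases h : ch ∈ pool
    · rw [if_pos h] at ha
      rcases ih _ _ _ ha with hk | hc
      · rcases List.mem_append.mp hk with hk | hk
        · exact Or.inl hk
        · simp at hk; subst hk; exact Or.inr (by simp)
      · exact Or.inr (List.mem_cons_of_mem _ hc)
    · rw [if_neg h] at ha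
      rcases ih _ _ _ ha with hk | hc
      · exact Or.inl hk
      · exact Or.inr (List.mem_cons_of_mem _ hc)

-- B's outer fold: the surviving list's counts are the running minima, and its
-- members come from the initial list.
lemma outer_fold_B (rest : List String) :
    ∀ (common : List Char),
    (∀ k, (rest.foldl (fun common x =>
        let pool := x.toList
        let st := common.foldl (fun (st : List Char × List Char) ch =>
          if ch ∈ st.1 then (st.1.erase ch, st.2 ++ [ch]) else st) (pool, ([] : List Char))
        st.2) common).count k
      = (rest.map (fun x => x.toList.count k)).foldl min (common.count k)) ∧
    (∀ a, a ∈ rest.foldl (fun common x =>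
        let pool := x.toList
        let st := common.foldl (fun (st : List Char × List Char) ch =>
          if ch ∈ st.1 then (st.1.erase ch, st.2 ++ [ch]) else st) (pool, ([] : List Char))
        st.2) common → a ∈ common) := by
  induction rest with
  | nil => intro common; exact ⟨fun k => rfl, fun a ha => ha⟩
  | cons x rest ih =>
    intro common
    simp only [List.foldl_cons, List.map_cons]
    obtain ⟨ihc, ihm⟩ := ih ((common.foldl (fun (st : List Char × List Char) ch =>
      if ch ∈ st.1 then (st.1.erase ch, st.2 ++ [ch]) else st) (x.toList, ([] : List Char))).2)
    refine ⟨?_, ?_⟩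
    · intro k
      rw [ihc k, innerB_count k common x.toList []]
      simp
    · intro a ha
      have := ihm a ha
      rcases innerB_mem common x.toList [] a this with h | h
      · simp at h
      · exact h

-- Casting: a foldl-min over Int casts of Nat counts is the cast of the Nat foldl-min.
lemma foldl_min_cast : ∀ (l : List Nat) (a : Nat),
    (l.map (fun n : Nat => (n : Int))).foldl min (a : Int) = ((l.foldl min a : Nat) : Int) := by
  intro l
  induction l with
  | nil => intro a; rfl
  | cons n l ih =>
    intro a
    simp only [List.map_cons, List.foldl_cons]
    rw [← Nat.cast_min]
    exact ih (min a n)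

-- count j survives filtering out a different character k.
lemma count_filter_ne (k : Char) :
    ∀ (l : List Char) (j : Char), j ≠ k →
    (l.filter (fun a => !(a == k))).count j = l.count j := by
  intro l
  induction l with
  | nil => intro j _; rfl
  | cons b l ih =>
    intro j hj
    by_cases hb : b = k
    · subst hb
      simp [ih j hj, Ne.symm hj]
    · simp [hb, List.count_cons, ih j hj]

-- length splits into the count of k plus the length of the rest.
lemma length_split (k : Char) :
    ∀ (l : List Char), l.count k + (l.filter (fun a => !(a == k))).length = l.length := by
  intro l
  induction l with
  | nil => rfl
  | cons b l ih =>
    by_cases hb : b = k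
    · subst hb
      simp only [List.count_cons, List.filter_cons, List.length_cons]
      simp
      omega
    · simp only [List.count_cons, List.filter_cons, List.length_cons]
      simp [hb]
      omega

-- If every member of l lies in the nodup list K, summing counts over K gives l's length.
lemma sum_counts_eq_length :
    ∀ (K : List Char), K.Nodup → ∀ (l : List Char), (∀ a ∈ l, a ∈ K) →
    (K.map (fun k => (l.count k : Int))).sum = (l.length : Int) := by
  intro K
  induction K with
  | nil =>
    intro _ l hl
    have : l = [] := List.eq_nil_iff_forall_not_mem.mpr (fun a ha => by simpa using hl a ha)
    subst this; rfl
  | cons k K ih =>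
    intro hnd l hl
    have hmem : ∀ a ∈ l.filter (fun a => !(a == k)), a ∈ K := by
      intro a ha
      have h1 := List.mem_of_mem_filter ha
      have h2 : a ≠ k := by simpa using (List.mem_filter.mp ha).2
      rcases List.mem_cons.mp (hl a h1) with h | h
      · exact absurd h h2
      · exact h
    have hIH := ih hnd.of_cons (l.filter (fun a => !(a == k))) hmem
    have hcongr : (K.map (fun j => ((l.filter (fun a => !(a == k))).count j : Int))).sum
        = (K.map (fun j => (l.count j : Int))).sum := by
      apply congrArg List.sum
      apply List.map_congr_left
      intro j hj
      have hjk : j ≠ k := fun h => (List.nodup_cons.mp hnd).1 (h ▸ hj)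
      rw [count_filter_ne k l j hjk]
    have hlen := length_split k l
    simp only [List.map_cons, List.sum_cons]
    rw [← hcongr, hIH]
    omega

-- ===== VERDICT (by name: the statement is the Claim_ definition above) =====
theorem commonCharacterCount2_spec : Claim_equal_commonCharacterCount2 := by
  intro s _ hpre
  unfold Spec_commonCharacterCount2
  match s with
  | [] => exact absurd rfl hpre
  | s0 :: rest =>
    simp only [commonCharacterCount2, commonCharacterCount2_alt]
    set K := (PySem.Dict.counter s0.toList).keys with hKdef
    have hnd : K.Nodup := PySem.Dict.nodup_keys_counter _
    have hnn : ∀ k, 0 ≤ (PySem.Dict.counter s0.toList).getD k 0 := by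
      intro k; rw [PySem.Dict.getD_counter]; exact Int.natCast_nonneg _
    obtain ⟨hK, hG⟩ := outer_fold_A rest (PySem.Dict.counter s0.toList) hnd hnn
    obtain ⟨hBc, hBm⟩ := outer_fold_B rest s0.toList
    set final := rest.foldl (fun common x =>
        let pool := x.toList
        let st := common.foldl (fun (st : List Char × List Char) ch =>
          if ch ∈ st.1 then (st.1.erase ch, st.2 ++ [ch]) else st) (pool, ([] : List Char))
        st.2) s0.toList with hfinal
    have hmemK : ∀ a ∈ final, a ∈ K := by
      intro a ha
      have : a ∈ s0.toList := hBm a ha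
      rw [hKdef, PySem.Dict.keys_counter]
      simpa [PySem.Dict.keys_counter, ← PySem.List.dedup_eq_ofList, PySem.List.mem_dedup] using this
    -- A's sum of values = sum over keys of the final minima
    rw [PySem.Dict.values_eq_map_keys _ (by rw [hK]; exact hnd) 0]
    rw [hK]
    rw [← sum_counts_eq_length K hnd final hmemK]
    apply congrArg List.sum
    apply List.map_congr_left
    intro k hk
    rw [hG k]
    simp only [hk, if_pos, PySem.Dict.getD_counter]
    rw [hBc k]
    have : (rest.map fun x => ((x.toList.count k : Int)))
        = (rest.map (fun x => x.toList.count k)).map (fun n : Nat => (n : Int)) := by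
      rw [List.map_map]; rfl
    rw [this, foldl_min_cast]
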